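-- pv_equiv track=rewrite | github.com/Jmat50/windows-m3u-stream-merger-proxy | windows-app/gui_app.py | _channel_discovery_key
-- ===== SOURCE A (Python) =====
-- def _channel_discovery_key(channel: str) -> str:
--     normalized = " ".join(str(channel).strip().split()).lower()
--     if not normalized:
--         return ""
--
--     for old, new in (
--         ("/", "_"),
--         ("\\", "_"),
--         (":", "_"),
--         ("*", "_"),
--         ("?", "_"),
--         ('"', "_"),
--         ("<", "_"),
--         (">", "_"),
--         ("|", "_"),
--         (" ", ""),
--     ):
--         normalized = normalized.replace(old, new)
--     return normalized[:100]
-- ===== SOURCE B (Python) =====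
-- # Single pass over the lowered string: skip whitespace, map Windows-reserved
-- # chars to '_' via a dict, truncate to 100 chars.
-- _TABLE = {"/": "_", "\\": "_", ":": "_", "*": "_", "?": "_", '"': "_", "<": "_", ">": "_", "|": "_"}
--
--
-- def _channel_discovery_key(channel: str) -> str:
--     out = []
--     for c in str(channel).lower():
--         if not c.isspace():
--             out.append(_TABLE.get(c, c))
--     return "".join(out[:100])
-- ===== Notes on version B (the rewrite author's own statement) =====
-- stated objective: simpler
-- what changed: Replaces A's strip/split/join normalization followed by ten sequential full-string str.replace passes with a single character-by-character pass that skips whitespace and maps each Windows-reserved character through a dict, then truncates to 100.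
import Mathlib
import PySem

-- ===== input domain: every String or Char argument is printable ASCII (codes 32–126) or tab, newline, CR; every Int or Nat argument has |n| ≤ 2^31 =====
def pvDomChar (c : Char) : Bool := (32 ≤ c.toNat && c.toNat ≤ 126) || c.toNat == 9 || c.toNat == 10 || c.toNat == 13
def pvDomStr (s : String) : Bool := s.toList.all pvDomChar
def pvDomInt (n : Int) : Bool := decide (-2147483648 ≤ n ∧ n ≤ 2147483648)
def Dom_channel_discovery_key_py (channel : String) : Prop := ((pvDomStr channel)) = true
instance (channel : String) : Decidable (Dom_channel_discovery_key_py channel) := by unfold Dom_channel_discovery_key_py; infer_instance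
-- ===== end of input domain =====

-- B replaces A's strip/split/join normalization plus ten sequential str.replace
-- passes by ONE character-by-character pass that skips whitespace and maps the
-- Windows-reserved characters through a dict (objective: simpler; not claimed faster).

-- ===== PORT A =====
def channel_discovery_key_py (channel : String) : String :=
  -- normalized = " ".join(str(channel).strip().split()).lower()
  let normalized := PySem.Str.lower (PySem.Str.join " " (PySem.Str.split₀ (PySem.Str.strip channel)))
  if normalized = "" then ""
  else
    -- the for-loop over the ten (old, new) pairs, as a foldl of str.replace
    let normalized :=
      [("/", "_"), ("\\", "_"), (":", "_"), ("*", "_"), ("?", "_"),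
       ("\"", "_"), ("<", "_"), (">", "_"), ("|", "_"), (" ", "")].foldl
        (fun s (p : String × String) => PySem.Str.replace s p.1 p.2) normalized
    PySem.Str.slice normalized none (some 100)    -- normalized[:100]

-- ===== PORT B =====
-- _TABLE = {"/": "_", "\\": "_", ":": "_", "*": "_", "?": "_", '"': "_", "<": "_", ">": "_", "|": "_"}
def bTable : PySem.Dict Char Char :=
  PySem.Dict.ofList [('/', '_'), ('\\', '_'), (':', '_'), ('*', '_'), ('?', '_'),
    ('"', '_'), ('<', '_'), ('>', '_'), ('|', '_')]

def channel_discovery_key_py_alt (channel : String) : String :=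
  -- for c in str(channel).lower(): if not c.isspace(): out.append(_TABLE.get(c, c))
  let out := (PySem.Str.lower channel).toList.foldl
    (fun acc c => if !(PySem.Chars.isspace c) then acc ++ [PySem.Dict.getD bTable c c] else acc) []
  String.ofList (out.take 100)    -- "".join(out[:100])

-- ===== PRECONDITION & SPEC =====
def Spec_channel_discovery_key_py (channel : String) (out : String) : Prop := out = channel_discovery_key_py_alt channel
instance (channel : String) (out : String) : Decidable (Spec_channel_discovery_key_py channel out) := by unfold Spec_channel_discovery_key_py; infer_instance

-- ===== CLAIM (what is proved, stated in full; the proofs are below) =====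
def Claim_equal_channel_discovery_key_py : Prop := ∀ (channel : String), Dom_channel_discovery_key_py channel → Spec_channel_discovery_key_py channel (channel_discovery_key_py channel)

-- ===== LEMMAS AND PROOFS =====

-- replace.go with a single-character pattern is a flatMap
theorem rep_go (a : Char) (new : List Char) :
    ∀ (l : List Char) (fuel : Nat) (acc : List Char), l.length ≤ fuel →
      PySem.Chars.replace.go [a] new fuel l acc
        = acc.reverse ++ l.flatMap (fun c => if c = a then new else [c]) := by
  intro l
  induction l with
  | nil => intro fuel acc _; cases fuel <;> simp [PySem.Chars.replace.go]
  | cons c t ih =>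
    intro fuel acc h
    cases fuel with
    | zero => simp at h
    | succ n =>
      simp only [PySem.Chars.replace.go]
      by_cases hc : c = a
      · subst hc
        have hp : [c].isPrefixOf (c :: t) = true := by simp [List.isPrefixOf]
        have hd : List.drop [c].length (c :: t) = t := by simp
        simp only [hp, if_pos trivial, hd]
        rw [ih n (new.reverse ++ acc) (by simpa using Nat.le_of_succ_le_succ h)]
        simp
      · have hp : [a].isPrefixOf (c :: t) = false := by
          simp [List.isPrefixOf]; exact fun h' => (hc h'.symm).elim
        simp only [hp, Bool.false_eq_true, if_false]
        rw [ih n (c :: acc) (by simpa using Nat.le_of_succ_le_succ h)]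
        simp [hc]

theorem replace_single (s : List Char) (a : Char) (new : List Char) :
    PySem.Chars.replace s [a] new = s.flatMap (fun c => if c = a then new else [c]) := by
  simp [PySem.Chars.replace]
  exact rep_go a new s s.length [] le_rfl

theorem replace_single_map (s : List Char) (a b : Char) :
    PySem.Chars.replace s [a] [b] = s.map (fun c => if c = a then b else c) := by
  rw [replace_single]
  induction s with
  | nil => rfl
  | cons c t ih => by_cases hc : c = a <;> simp [hc, ih]

theorem replace_single_del (s : List Char) (a : Char) :
    PySem.Chars.replace s [a] [] = s.filter (fun c => c ≠ a) := by
  rw [replace_single]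
  induction s with
  | nil => rfl
  | cons c t ih => by_cases hc : c = a <;> simp [hc, ih]

-- the words produced by split() concatenate to the non-whitespace characters
theorem split0_go_flatten :
    ∀ (s cur : List Char) (acc : List (List Char)),
      (PySem.Chars.split₀.go s cur acc).flatten
        = acc.reverse.flatten ++ cur.reverse ++ s.filter (fun c => !PySem.Chars.isspace c) := by
  intro s
  induction s with
  | nil =>
    intro cur acc
    by_cases hc : cur.isEmpty <;> simp_all [PySem.Chars.split₀.go, List.isEmpty_iff]
  | cons c rest ih =>
    intro cur acc
    by_cases hs : PySem.Chars.isspace c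
    · by_cases hc : cur.isEmpty <;>
        simp_all [PySem.Chars.split₀.go, List.isEmpty_iff, ih]
    · simp [PySem.Chars.split₀.go, hs, ih]

-- no word produced by split() contains a whitespace character
theorem split0_go_words :
    ∀ (s cur : List Char) (acc : List (List Char)),
      (∀ c ∈ cur, PySem.Chars.isspace c = false) →
      (∀ w ∈ acc, ∀ c ∈ w, PySem.Chars.isspace c = false) →
      ∀ w ∈ PySem.Chars.split₀.go s cur acc, ∀ c ∈ w, PySem.Chars.isspace c = false := by
  intro s
  induction s with
  | nil =>
    intro cur acc hcur hacc
    by_cases hc : cur.isEmpty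
    · simp only [PySem.Chars.split₀.go, hc, if_pos rfl]
      intro w hw; exact hacc w (List.mem_reverse.1 hw)
    · simp only [PySem.Chars.split₀.go, hc, Bool.false_eq_true, if_false]
      intro w hw
      rcases List.mem_cons.1 (List.mem_reverse.1 hw) with h | h
      · subst h; intro x hx; exact hcur x (List.mem_reverse.1 hx)
      · exact hacc w (List.mem_reverse.1 (List.mem_reverse.2 h))
  | cons c rest ih =>
    intro cur acc hcur hacc
    by_cases hs : PySem.Chars.isspace c
    · by_cases hc : cur.isEmpty
      · simp only [PySem.Chars.split₀.go, hs, hc, if_pos rfl]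
        exact ih [] acc (by simp) hacc
      · simp only [PySem.Chars.split₀.go, hs, hc, if_pos rfl, Bool.false_eq_true, if_false]
        refine ih [] (cur.reverse :: acc) (by simp) ?_
        intro w hw
        rcases List.mem_cons.1 hw with h | h
        · subst h; intro x hx; exact hcur x (List.mem_reverse.1 hx)
        · exact hacc w h
    · simp only [PySem.Chars.split₀.go, hs, Bool.false_eq_true, if_false]
      refine ih (c :: cur) acc ?_ hacc
      intro x hx
      rcases List.mem_cons.1 hx with h | h
      · subst h; simpa using hs
      · exact hcur x h

-- filtering the separator out of " ".join(words) gives back the concatenation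
theorem filter_intercalate (p : Char → Bool) (hp : p ' ' = false) :
    ∀ (parts : List (List Char)),
      (∀ w ∈ parts, ∀ c ∈ w, p c = true) →
      ([' '].intercalate parts).filter p = parts.flatten := by
  intro parts
  induction parts with
  | nil => intro _; simp [List.intercalate]
  | cons w rest ih =>
    intro h
    have hw : w.filter p = w :=
      List.filter_eq_self.2 (fun c hc => h w (List.mem_cons_self) c hc)
    cases rest with
    | nil => simpa [List.intercalate] using hw
    | cons v rest' =>
      have hstep : ([' '] : List Char).intercalate (w :: v :: rest')
          = w ++ [' '] ++ ([' '] : List Char).intercalate (v :: rest') := by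
        simp [List.intercalate, List.intersperse]
      rw [hstep]
      simp only [List.filter_append, hw, hp]
      rw [ih (fun u hu => h u (List.mem_cons_of_mem _ hu))]
      simp [hp]

-- ---- character-level facts ----

theorem bTable_mk : bTable = PySem.Dict.mk [('/', '_'), ('\\', '_'), (':', '_'), ('*', '_'),
    ('?', '_'), ('"', '_'), ('<', '_'), ('>', '_'), ('|', '_')] := by decide

theorem bmap_id (x : Char) (h1 : x ≠ '/') (h2 : x ≠ '\\') (h3 : x ≠ ':') (h4 : x ≠ '*') (h5 : x ≠ '?') (h6 : x ≠ '"') (h7 : x ≠ '<') (h8 : x ≠ '>') (h9 : x ≠ '|') :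
    bTable.getD x x = x := by
  rw [bTable_mk, PySem.Dict.getD_eq_get?_getD]
  simp only [PySem.Dict.get?_mk_cons, beq_iff_eq, if_neg (Ne.symm h1), if_neg (Ne.symm h2), if_neg (Ne.symm h3), if_neg (Ne.symm h4), if_neg (Ne.symm h5), if_neg (Ne.symm h6), if_neg (Ne.symm h7), if_neg (Ne.symm h8), if_neg (Ne.symm h9)]
  simp [PySem.Dict.get?]

theorem isupper_iff (c : Char) : PySem.Chars.isupper c = true ↔ 65 ≤ c.toNat ∧ c.toNat ≤ 90 := by
  simp only [PySem.Chars.isupper, Bool.and_eq_true, decide_eq_true_eq, Char.le_def,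
    UInt32.le_iff_toNat_le, Char.toNat]
  exact ⟨fun ⟨a, b⟩ => ⟨a, b⟩, fun ⟨a, b⟩ => ⟨a, b⟩⟩

theorem lower_cases (c : Char) :
    PySem.Chars.lowerChar c = c ∨
      (97 ≤ (PySem.Chars.lowerChar c).toNat ∧ (PySem.Chars.lowerChar c).toNat ≤ 122 ∧
       65 ≤ c.toNat ∧ c.toNat ≤ 90) := by
  by_cases hu : PySem.Chars.isupper c = true
  · right
    obtain ⟨b1, b2⟩ := (isupper_iff c).1 hu
    have ht : (Char.ofNat (c.toNat + 32)).toNat = c.toNat + 32 := by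
      rw [Char.toNat_ofNat, if_pos]; left; omega
    simp only [PySem.Chars.lowerChar, hu, if_true]
    rw [ht]
    exact ⟨by omega, by omega, b1, b2⟩
  · left; simp [PySem.Chars.lowerChar, hu]

theorem isspace_lower (c : Char) :
    PySem.Chars.isspace (PySem.Chars.lowerChar c) = PySem.Chars.isspace c := by
  rcases lower_cases c with h | ⟨b1, b2, b3, b4⟩
  · rw [h]
  · have e1 : PySem.Chars.isspace (PySem.Chars.lowerChar c) = false := by
      simp only [PySem.Chars.isspace, Bool.or_eq_false_iff, Bool.and_eq_false_iff,
        decide_eq_false_iff_not]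
      omega
    have e2 : PySem.Chars.isspace c = false := by
      simp only [PySem.Chars.isspace, Bool.or_eq_false_iff, Bool.and_eq_false_iff,
        decide_eq_false_iff_not]
      omega
    rw [e1, e2]

theorem maps_chain (l : List Char) :
    (((((((((l.map (fun c => if c = '/' then '_' else c)).map (fun c => if c = '\\' then '_' else c)).map (fun c => if c = ':' then '_' else c)).map (fun c => if c = '*' then '_' else c)).map (fun c => if c = '?' then '_' else c)).map (fun c => if c = '"' then '_' else c)).map (fun c => if c = '<' then '_' else c)).map (fun c => if c = '>' then '_' else c)).map (fun c => if c = '|' then '_' else c))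
      = l.map (fun c => bTable.getD c c) := by
  induction l with
  | nil => rfl
  | cons c t ih =>
    simp only [List.map_cons]
    refine congrArg₂ List.cons ?_ ih
    by_cases h1 : c = '/'
    · subst h1; decide
    by_cases h2 : c = '\\'
    · subst h2; decide
    by_cases h3 : c = ':'
    · subst h3; decide
    by_cases h4 : c = '*'
    · subst h4; decide
    by_cases h5 : c = '?'
    · subst h5; decide
    by_cases h6 : c = '"'
    · subst h6; decide
    by_cases h7 : c = '<'
    · subst h7; decide
    by_cases h8 : c = '>'
    · subst h8; decide
    by_cases h9 : c = '|'
    · subst h9; decide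
    rw [if_neg h1, if_neg h2, if_neg h3, if_neg h4, if_neg h5, if_neg h6, if_neg h7, if_neg h8, if_neg h9]
    exact (bmap_id c h1 h2 h3 h4 h5 h6 h7 h8 h9).symm

theorem bmap_ne_space (c : Char) (h : PySem.Chars.isspace c = false) :
    bTable.getD (PySem.Chars.lowerChar c) (PySem.Chars.lowerChar c) ≠ ' ' := by
  rcases lower_cases c with hid | ⟨b1, b2, b3, b4⟩
  · rw [hid]
    by_cases h1 : c = '/'
    · subst h1; decide
    by_cases h2 : c = '\\'
    · subst h2; decide
    by_cases h3 : c = ':'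
    · subst h3; decide
    by_cases h4 : c = '*'
    · subst h4; decide
    by_cases h5 : c = '?'
    · subst h5; decide
    by_cases h6 : c = '"'
    · subst h6; decide
    by_cases h7 : c = '<'
    · subst h7; decide
    by_cases h8 : c = '>'
    · subst h8; decide
    by_cases h9 : c = '|'
    · subst h9; decide
    rw [bmap_id c h1 h2 h3 h4 h5 h6 h7 h8 h9]
    intro he; rw [he] at h; exact absurd h (by decide)
  · have hni : ∀ (a : Char), a.toNat < 97 ∨ 122 < a.toNat → PySem.Chars.lowerChar c ≠ a := by
      intro a ha hcontra
      rw [hcontra] at b1 b2; omega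
    rw [bmap_id _ (hni '/' (by decide)) (hni '\\' (by decide)) (hni ':' (by decide))
      (hni '*' (by decide)) (hni '?' (by decide)) (hni '"' (by decide)) (hni '<' (by decide))
      (hni '>' (by decide)) (hni '|' (by decide))]
    intro he; rw [he] at b1; exact absurd b1 (by decide)

-- stripping only removes whitespace characters
theorem filter_dropWhile (l : List Char) :
    (l.dropWhile PySem.Chars.isspace).filter (fun c => !PySem.Chars.isspace c)
      = l.filter (fun c => !PySem.Chars.isspace c) := by
  induction l with
  | nil => rfl
  | cons c t ih => by_cases h : PySem.Chars.isspace c <;> simp [List.dropWhile_cons, h, ih]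

theorem filter_strip (l : List Char) :
    (PySem.Chars.strip l).filter (fun c => !PySem.Chars.isspace c)
      = l.filter (fun c => !PySem.Chars.isspace c) := by
  unfold PySem.Chars.strip PySem.Chars.rstrip PySem.Chars.lstrip
  rw [List.filter_reverse, filter_dropWhile, List.filter_reverse, List.reverse_reverse,
    filter_dropWhile]

theorem split0_flatten (x : List Char) :
    (PySem.Chars.split₀ x).flatten = x.filter (fun c => !PySem.Chars.isspace c) := by
  simpa [PySem.Chars.split₀] using split0_go_flatten x [] []

theorem split0_words (x : List Char) :
    ∀ w ∈ PySem.Chars.split₀ x, ∀ c ∈ w, PySem.Chars.isspace c = false := by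
  simpa [PySem.Chars.split₀] using split0_go_words x [] [] (by simp) (by simp)

-- ---- the two ports compute the same character list ----
theorem main_list (channel : String) :
    (channel_discovery_key_py channel).toList = (channel_discovery_key_py_alt channel).toList := by
  have hlow : (PySem.Str.lower channel).toList = channel.toList.map PySem.Chars.lowerChar := by
    simp [PySem.Str.toList_lower, PySem.Chars.lower]
  have hB : (channel_discovery_key_py_alt channel).toList
      = ((channel.toList.filter (fun c => !PySem.Chars.isspace c)).map
          (fun c => bTable.getD (PySem.Chars.lowerChar c) (PySem.Chars.lowerChar c))).take 100 := by
    unfold channel_discovery_key_py_alt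
    simp only [String.toList_ofList, hlow]
    rw [PySem.List.foldl_append_if]
    rw [List.filter_map]
    rw [List.filter_congr (fun c _ => by
      simp only [Function.comp_apply, isspace_lower c] : ∀ c ∈ channel.toList,
        ((fun c => !PySem.Chars.isspace c) ∘ PySem.Chars.lowerChar) c
          = (fun c => !PySem.Chars.isspace c) c)]
    simp [List.map_map, Function.comp_def]
  have hnorm : (PySem.Str.lower (PySem.Str.join " " (PySem.Str.split₀ (PySem.Str.strip channel)))).toList
      = ([' '].intercalate (PySem.Chars.split₀ (PySem.Chars.strip channel.toList))).map
          PySem.Chars.lowerChar := by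
    simp [PySem.Str.toList_lower, PySem.Chars.lower, PySem.Str.toList_join,
      PySem.Str.split₀_map_toList, PySem.Chars.join, PySem.Str.toList_strip]
  rw [hB]
  simp only [channel_discovery_key_py]
  by_cases hem : PySem.Str.lower (PySem.Str.join " " (PySem.Str.split₀ (PySem.Str.strip channel))) = ""
  · -- the normalized string is empty: both results are empty
    have hJ : ([' '].intercalate (PySem.Chars.split₀ (PySem.Chars.strip channel.toList))) = [] := by
      have h' := congrArg String.toList hem
      rw [hnorm] at h'
      simpa using h'
    have hfl : (PySem.Chars.split₀ (PySem.Chars.strip channel.toList)).flatten = [] := by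
      rw [← filter_intercalate (fun c => !PySem.Chars.isspace c) (by decide) _
        (fun w hw c hc => by simp [split0_words _ w hw c hc]), hJ]
      rfl
    have hempty : channel.toList.filter (fun c => !PySem.Chars.isspace c) = [] := by
      rw [← filter_strip, ← split0_flatten]
      exact hfl
    rw [if_pos hem, hempty]
    rfl
  · rw [if_neg hem]
    have hsl : ∀ (u : String), (PySem.Str.slice u none (some 100)).toList = u.toList.take 100 := by
      intro u
      rw [PySem.Str.toList_slice, PySem.Chars.slice_eq_listSlice,
        PySem.List.slice_to u.toList (by norm_num : (0 : Int) ≤ 100)]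
      congr 1
    simp only [List.foldl_cons, List.foldl_nil]
    rw [hsl]
    simp only [PySem.Str.toList_replace]
    have t1 : "/".toList = ['/'] := by decide
    have t2 : "\\".toList = ['\\'] := by decide
    have t3 : ":".toList = [':'] := by decide
    have t4 : "*".toList = ['*'] := by decide
    have t5 : "?".toList = ['?'] := by decide
    have t6 : "\"".toList = ['"'] := by decide
    have t7 : "<".toList = ['<'] := by decide
    have t8 : ">".toList = ['>'] := by decide
    have t9 : "|".toList = ['|'] := by decide
    have t10 : " ".toList = [' '] := by decide
    have t11 : "_".toList = ['_'] := by decide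
    have t12 : "".toList = [] := by decide
    rw [t1, t2, t3, t4, t5, t6, t7, t8, t9, t10, t11, t12, hnorm]
    rw [replace_single_del, replace_single_map, replace_single_map, replace_single_map,
      replace_single_map, replace_single_map, replace_single_map, replace_single_map,
      replace_single_map, replace_single_map]
    rw [maps_chain, List.map_map, List.filter_map]
    rw [filter_intercalate _ (by decide) _ (fun w hw c hc => by
      simp only [Function.comp_apply, decide_eq_true_eq]
      exact bmap_ne_space c (split0_words _ w hw c hc))]
    rw [split0_flatten, filter_strip]
    simp [Function.comp_def]

-- ===== VERDICT (by name: the statement is the Claim_ definition above) =====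
theorem channel_discovery_key_py_spec : Claim_equal_channel_discovery_key_py := by
  intro channel _
  unfold Spec_channel_discovery_key_py
  exact String.toList_inj.mp (main_list channel)
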